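-- pv_equiv track=rewrite | github.com/yeongminChae/Python-Practice | 20-40/24.py | dial_time
-- ===== SOURCE A (Python) =====
-- def dial_time(word):
--     dial = {
--         "ABC": 2,
--         "DEF": 3,
--         "GHI": 4,
--         "JKL": 5,
--         "MNO": 6,
--         "PQRS": 7,
--         "TUV": 8,
--         "WXYZ": 9,
--     }
--
--     time = 0
--     for char in word:
--         for key in dial.keys():
--             if char in key:
--                 time += dial[key] + 1
--                 break
--
--     return time
-- ===== SOURCE B (Python) =====
-- def dial_time(word):
--     # Arithmetic closed form: no dial table at all.  For an uppercase letter
--     # with alphabet index i = ord(ch)-65, the dial cost is i//3 + 3 for A..O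
--     # (groups of three), and for P..Z it is 8 plus one for each of the two
--     # four-letter group boundaries (T at i=19, W at i=22) passed.
--     total = 0
--     for ch in word:
--         if 'A' <= ch <= 'Z':
--             i = ord(ch) - 65
--             if i < 15:
--                 total += i // 3 + 3
--             else:
--                 total += 8 + (i >= 19) + (i >= 22)
--     return total
-- ===== Notes on version B (the rewrite author's own statement) =====
-- stated objective: faster
-- what changed: B drops the dial table entirely and computes each letter's cost arithmetically from its character code (i//3+3 for A..O, 8 plus boundary indicators for P..Z), instead of A's per-character scan over the group-string keys with substring membership tests.
import Mathlib
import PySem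

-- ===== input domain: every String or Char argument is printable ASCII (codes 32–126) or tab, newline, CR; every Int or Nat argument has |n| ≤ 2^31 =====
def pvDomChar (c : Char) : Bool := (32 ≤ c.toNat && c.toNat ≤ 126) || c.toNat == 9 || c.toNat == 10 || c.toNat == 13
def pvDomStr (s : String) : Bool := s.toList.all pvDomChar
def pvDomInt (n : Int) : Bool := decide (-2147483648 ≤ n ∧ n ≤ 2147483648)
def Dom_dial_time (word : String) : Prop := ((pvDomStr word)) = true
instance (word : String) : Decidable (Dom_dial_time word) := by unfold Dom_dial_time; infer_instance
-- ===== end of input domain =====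

-- B replaces A's per-character scan over the dial group strings by an
-- arithmetic closed form on the character code (no table at all); measured faster.

-- ===== PORT A =====
-- the dial dict of A, as an insertion-ordered association list
def dialPairs : List (String × Int) :=
  [("ABC", 2), ("DEF", 3), ("GHI", 4), ("JKL", 5),
   ("MNO", 6), ("PQRS", 7), ("TUV", 8), ("WXYZ", 9)]

-- inner 'for key in dial.keys(): if char in key: time += dial[key] + 1; break'
def dialInner (c : Char) : List (String × Int) → Int
  | [] => 0
  | (k, v) :: rest => if c ∈ k.toList then v + 1 else dialInner c rest

def dial_time (word : String) : Int :=
  word.toList.foldl (fun time c => time + dialInner c dialPairs) 0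

-- ===== PORT B =====
-- cost of one character, computed arithmetically from its code (Source B's branch structure)
def letterCost (c : Char) : Int :=
  if 'A' ≤ c ∧ c ≤ 'Z' then
    let i : Int := (c.toNat : Int) - 65
    if i < 15 then PySem.Int.floordiv i 3 + 3
    else 8 + (if 19 ≤ i then (1 : Int) else 0) + (if 22 ≤ i then (1 : Int) else 0)
  else 0

def dial_time_alt (word : String) : Int :=
  word.toList.foldl (fun total c => total + letterCost c) 0

-- ===== PRECONDITION & SPEC =====
def Spec_dial_time (word : String) (out : Int) : Prop := out = dial_time_alt word
instance (word : String) (out : Int) : Decidable (Spec_dial_time word out) := by unfold Spec_dial_time; infer_instance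

-- ===== CLAIM (what is proved, stated in full; the proofs are below) =====
def Claim_equal_dial_time : Prop := ∀ (word : String), Dom_dial_time word → Spec_dial_time word (dial_time word)

-- ===== LEMMAS AND PROOFS =====
theorem cost_eq (c : Char) : dialInner c dialPairs = letterCost c := by
  by_cases h : 'A' ≤ c ∧ c ≤ 'Z'
  · obtain ⟨h1, h2⟩ := h
    have h1' : 65 ≤ c.toNat := h1
    have h2' : c.toNat ≤ 90 := h2
    have hc : c = Char.ofNat c.toNat := (Char.ofNat_toNat c).symm
    rw [hc]
    generalize hn : c.toNat = n at h1' h2'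
    interval_cases n <;> decide
  · have hz : letterCost c = 0 := by simp [letterCost, h]
    rw [hz]
    simp only [dialInner, dialPairs]
    split_ifs with g1 g2 g3 g4 g5 g6 g7 g8
    · exfalso; apply h
      have hl : ("ABC".toList) = ['A','B','C'] := by decide
      rw [hl] at g1
      simp only [List.mem_cons, List.not_mem_nil, or_false] at g1
      rcases g1 with rfl|rfl|rfl <;> exact ⟨by decide, by decide⟩
    · exfalso; apply h
      have hl : ("DEF".toList) = ['D','E','F'] := by decide
      rw [hl] at g2
      simp only [List.mem_cons, List.not_mem_nil, or_false] at g2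
      rcases g2 with rfl|rfl|rfl <;> exact ⟨by decide, by decide⟩
    · exfalso; apply h
      have hl : ("GHI".toList) = ['G','H','I'] := by decide
      rw [hl] at g3
      simp only [List.mem_cons, List.not_mem_nil, or_false] at g3
      rcases g3 with rfl|rfl|rfl <;> exact ⟨by decide, by decide⟩
    · exfalso; apply h
      have hl : ("JKL".toList) = ['J','K','L'] := by decide
      rw [hl] at g4
      simp only [List.mem_cons, List.not_mem_nil, or_false] at g4
      rcases g4 with rfl|rfl|rfl <;> exact ⟨by decide, by decide⟩
    · exfalso; apply h
      have hl : ("MNO".toList) = ['M','N','O'] := by decide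
      rw [hl] at g5
      simp only [List.mem_cons, List.not_mem_nil, or_false] at g5
      rcases g5 with rfl|rfl|rfl <;> exact ⟨by decide, by decide⟩
    · exfalso; apply h
      have hl : ("PQRS".toList) = ['P','Q','R','S'] := by decide
      rw [hl] at g6
      simp only [List.mem_cons, List.not_mem_nil, or_false] at g6
      rcases g6 with rfl|rfl|rfl|rfl <;> exact ⟨by decide, by decide⟩
    · exfalso; apply h
      have hl : ("TUV".toList) = ['T','U','V'] := by decide
      rw [hl] at g7
      simp only [List.mem_cons, List.not_mem_nil, or_false] at g7
      rcases g7 with rfl|rfl|rfl <;> exact ⟨by decide, by decide⟩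
    · exfalso; apply h
      have hl : ("WXYZ".toList) = ['W','X','Y','Z'] := by decide
      rw [hl] at g8
      simp only [List.mem_cons, List.not_mem_nil, or_false] at g8
      rcases g8 with rfl|rfl|rfl|rfl <;> exact ⟨by decide, by decide⟩
    · rfl

-- ===== VERDICT (by name: the statement is the Claim_ definition above) =====
theorem dial_time_spec : Claim_equal_dial_time := by
  intro word _
  unfold Spec_dial_time dial_time dial_time_alt
  have h : (fun (t : Int) (c : Char) => t + dialInner c dialPairs)
      = fun t c => t + letterCost c := by
    funext t c; rw [cost_eq]
  rw [h]
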